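-- pv_equiv track=rewrite | github.com/Aasthaengg/IBMdataset | Python_codes/p03039/s260094884.py | solve
-- ===== SOURCE A (Python) =====
-- LARGE = 10**9 + 7
--
-- def p_inv(k, p):
--     return pow(k, p-2, p)
--
-- def nck_mod(n, k, m):
--     res = 1
--     for i in range(n, n-k, -1):
--         res = res * i % m
--     for i in range(1, k+1):
--         res = res * p_inv(i, m) % m
--     return res
--
-- def solve(n, m, k):
--     res_1 = 0
--     r = n * (n - 1) // 2
--     res_1 += r
--     for i in range(1, n):
--         r += i
--         r -= n - i
--         res_1 += r
--     res_2 = 0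
--     r = m * (m - 1) // 2
--     res_2 += r
--     for i in range(1, m):
--         r += i
--         r -= m - i
--         res_2 += r
--     res = (res_1 * m * m + res_2 * n * n) % LARGE
--
--     weight = nck_mod(n * m - 1, k - 1, LARGE) * p_inv(n * m - 1, LARGE) * (k - 1) * p_inv(2, LARGE) % LARGE
--
--     return res * weight % LARGE
-- ===== SOURCE B (Python) =====
-- LARGE = 10**9 + 7
--
-- def solve(n, m, k):
--     p = LARGE
--
--     def axis_sum(t):
--         # sum of |i - j| over ordered pairs 0 <= i, j < t
--         return (t * t * t - t) // 3
--
--     res = (axis_sum(n) * m * m + axis_sum(m) * n * n) % p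
--     N = n * m - 1
--     num = 1
--     den = 1
--     for j in range(1, k):
--         num = num * (N - j + 1) % p
--         den = den * j % p
--     weight = num * (k - 1) % p * pow(den * (N % p) % p * 2 % p, p - 2, p) % p
--     return res * weight % p
-- ===== Notes on version B (the rewrite author's own statement) =====
-- stated objective: faster
-- what changed: Replaces the two O(n) and O(m) accumulation loops by closed-form cubic formulas, fuses the binomial's numerator and denominator into one loop, and replaces the k+1 modular exponentiations by a single modular inverse of the accumulated denominator; Pre_ restricts to nonnegative grid dimensions n, m (the task's natural domain), excluding negative dimensions where A's pair-distance loop never runs and its value is only the leftover triangular initializer.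
-- outside the precondition, e.g. on solve(-2, 3, 2): A returns 500000033, B returns 7
import Mathlib
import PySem

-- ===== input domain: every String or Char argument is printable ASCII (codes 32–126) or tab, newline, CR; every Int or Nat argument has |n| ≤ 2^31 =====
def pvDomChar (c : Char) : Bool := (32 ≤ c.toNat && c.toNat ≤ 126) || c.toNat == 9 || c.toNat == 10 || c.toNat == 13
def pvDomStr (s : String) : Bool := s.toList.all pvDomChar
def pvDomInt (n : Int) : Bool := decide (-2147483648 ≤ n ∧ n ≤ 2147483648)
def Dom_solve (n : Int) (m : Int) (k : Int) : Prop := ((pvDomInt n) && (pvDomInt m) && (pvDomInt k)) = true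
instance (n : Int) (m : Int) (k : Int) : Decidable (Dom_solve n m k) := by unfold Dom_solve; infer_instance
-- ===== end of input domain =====

-- B replaces A's O(n)+O(m) accumulation loops by closed-form cubic formulas and A's
-- per-factor modular inverses by one fused numerator/denominator loop with a single
-- modular inverse (objective: faster; measured).


-- ===== PORT A =====
def pvLARGE : Int := 1000000007

-- Python's three-argument pow(b, e, m), written as CPython computes it (binary
-- exponentiation). It computes the same value as b ^ e % m for 0 < m (lemma
-- pypow_eq_emod below), but a linear reduction is infeasible in the evaluator for
-- this program's exponent p - 2 = 10^9 + 5.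
def pypow (b : Int) (e : Nat) (m : Int) : Int :=
  if h : e = 0 then 1 % m
  else
    let half := pypow b (e / 2) m
    let sq := half * half % m
    if e % 2 = 1 then sq * (b % m) % m else sq
  termination_by e
  decreasing_by exact Nat.div_lt_self (Nat.pos_of_ne_zero h) (by norm_num)

-- pow(k, p-2, p); the exponent p-2 is nonnegative at every call site (p = 10^9+7),
-- so the .toNat conversion is exact there
def p_inv (k : Int) (p : Int) : Int := pypow k (p - 2).toNat p

def nck_mod (n : Int) (k : Int) (m : Int) : Int :=
  let res := (PySem.List.pyRange n (n - k) (-1)).foldl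
      (fun res i => PySem.Int.mod (res * i) m) 1
  (PySem.List.pyRange 1 (k + 1) 1).foldl
      (fun res i => PySem.Int.mod (res * p_inv i m) m) res

def solve (n : Int) (m : Int) (k : Int) : Int :=
  let r1 := PySem.Int.floordiv (n * (n - 1)) 2
  let st1 := (PySem.List.pyRange 1 n 1).foldl
      (fun (st : Int × Int) i =>
        let r := st.2 + i - (n - i)
        (st.1 + r, r)) (0 + r1, r1)
  let res_1 := st1.1
  let r2 := PySem.Int.floordiv (m * (m - 1)) 2
  let st2 := (PySem.List.pyRange 1 m 1).foldl
      (fun (st : Int × Int) i =>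
        let r := st.2 + i - (m - i)
        (st.1 + r, r)) (0 + r2, r2)
  let res_2 := st2.1
  let res := PySem.Int.mod (res_1 * m * m + res_2 * n * n) pvLARGE
  let weight := PySem.Int.mod
      (nck_mod (n * m - 1) (k - 1) pvLARGE * p_inv (n * m - 1) pvLARGE * (k - 1)
        * p_inv 2 pvLARGE) pvLARGE
  PySem.Int.mod (res * weight) pvLARGE

-- ===== PORT B =====
-- sum of |i - j| over ordered pairs 0 <= i, j < t
def axisSum (t : Int) : Int := PySem.Int.floordiv (t * t * t - t) 3

def solve_alt (n : Int) (m : Int) (k : Int) : Int :=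
  let p := pvLARGE
  let res := PySem.Int.mod (axisSum n * m * m + axisSum m * n * n) p
  let N := n * m - 1
  let st := (PySem.List.pyRange 1 k 1).foldl
      (fun (st : Int × Int) j =>
        (PySem.Int.mod (st.1 * (N - j + 1)) p, PySem.Int.mod (st.2 * j) p)) (1, 1)
  let weight := PySem.Int.mod
      (PySem.Int.mod (st.1 * (k - 1)) p
        * pypow (PySem.Int.mod (PySem.Int.mod (st.2 * PySem.Int.mod N p) p * 2) p)
            (p - 2).toNat p) p
  PySem.Int.mod (res * weight) p

-- ===== PRECONDITION & SPEC =====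
-- Pre_ restricts to nonnegative grid dimensions n, m (the task's natural domain);
-- on negative dimensions A still returns, but its per-axis pair loop never runs and
-- the returned value is only the leftover triangular initializer, which B does not match.
def Pre_solve (n : Int) (m : Int) (k : Int) : Prop := 0 ≤ n ∧ 0 ≤ m
instance (n : Int) (m : Int) (k : Int) : Decidable (Pre_solve n m k) := by unfold Pre_solve; infer_instance
def pvWitness_solve : Int × Int × Int := (3, 4, 5)

def Spec_solve (n : Int) (m : Int) (k : Int) (out : Int) : Prop := out = solve_alt n m k
instance (n : Int) (m : Int) (k : Int) (out : Int) : Decidable (Spec_solve n m k out) := by unfold Spec_solve; infer_instance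

-- ===== CLAIM (what is proved, stated in full; the proofs are below) =====
def Claim_equal_solve : Prop := ∀ (n : Int) (m : Int) (k : Int), Dom_solve n m k → Pre_solve n m k → Spec_solve n m k (solve n m k)

-- ===== LEMMAS AND PROOFS =====

theorem pv_hP : (0 : Int) < pvLARGE := by norm_num [pvLARGE]

theorem pypow_eq_emod (b : Int) (e : Nat) (m : Int) :
    pypow b e m = b ^ e % m := by
  induction e using Nat.strong_induction_on with
  | _ e ih =>
    rw [pypow]
    split_ifs with h0 h1
    · simp [h0]
    · rw [ih (e / 2) (Nat.div_lt_self (Nat.pos_of_ne_zero h0) (by norm_num))]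
      have he : b ^ (e / 2) * b ^ (e / 2) * b = b ^ e := by
        rw [← pow_add, ← pow_succ]
        congr 1
        omega
      show b ^ (e / 2) % m * (b ^ (e / 2) % m) % m * (b % m) % m = b ^ e % m
      conv_rhs => rw [← he, Int.mul_emod, Int.mul_emod (b ^ (e / 2)) (b ^ (e / 2)) m]
    · rw [ih (e / 2) (Nat.div_lt_self (Nat.pos_of_ne_zero h0) (by norm_num))]
      have he : b ^ (e / 2) * b ^ (e / 2) = b ^ e := by
        rw [← pow_add]
        congr 1
        omega
      show b ^ (e / 2) % m * (b ^ (e / 2) % m) % m = b ^ e % m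
      conv_rhs => rw [← he, Int.mul_emod]

theorem axis_fold_inv (c r0 : Int) : ∀ b : Int, 1 ≤ b →
    6 * ((PySem.List.pyRange 1 b 1).foldl
      (fun (st : Int × Int) i => (st.1 + (st.2 + i - (c - i)), st.2 + i - (c - i)))
      (0 + r0, r0)).1
      = 6 * b * r0 + 2 * (b - 1) * b * (b + 1) - 3 * c * (b - 1) * b ∧
    ((PySem.List.pyRange 1 b 1).foldl
      (fun (st : Int × Int) i => (st.1 + (st.2 + i - (c - i)), st.2 + i - (c - i)))
      (0 + r0, r0)).2
      = r0 + b * (b - 1) - c * (b - 1) := by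
  intro b hb
  induction b, hb using Int.le_induction with
  | base =>
      rw [PySem.List.pyRange_one_eq_nil le_rfl]
      simp
  | succ b hb ih =>
      obtain ⟨h1, h2⟩ := ih
      rw [PySem.List.pyRange_one_succ_right hb, List.foldl_append]
      simp only [List.foldl_cons, List.foldl_nil]
      constructor
      · linear_combination h1 + 6 * h2
      · linear_combination h2

theorem axis_fold (c : Int) (hc : 0 ≤ c) :
    ((PySem.List.pyRange 1 c 1).foldl
      (fun (st : Int × Int) i => (st.1 + (st.2 + i - (c - i)), st.2 + i - (c - i)))
      (0 + PySem.Int.floordiv (c * (c - 1)) 2, PySem.Int.floordiv (c * (c - 1)) 2)).1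
      = axisSum c := by
  have hdvd : (2 : Int) ∣ c * (c - 1) := by
    rcases Int.even_or_odd c with h | h
    · exact Dvd.dvd.mul_right h.two_dvd _
    · obtain ⟨t, ht⟩ := h
      exact Dvd.dvd.mul_left ⟨t, by omega⟩ _
  have hr0 : 2 * PySem.Int.floordiv (c * (c - 1)) 2 = c * (c - 1) := by
    rw [PySem.Int.floordiv_eq_ediv_of_pos (by norm_num)]
    exact Int.mul_ediv_cancel' hdvd
  by_cases hc1 : 1 ≤ c
  · obtain ⟨h1, _⟩ := axis_fold_inv c (PySem.Int.floordiv (c * (c - 1)) 2) c hc1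
    set X := ((PySem.List.pyRange 1 c 1).foldl
      (fun (st : Int × Int) i => (st.1 + (st.2 + i - (c - i)), st.2 + i - (c - i)))
      (0 + PySem.Int.floordiv (c * (c - 1)) 2, PySem.Int.floordiv (c * (c - 1)) 2)).1 with hX
    have h6 : 6 * X = 2 * (c * c * c - c) := by linear_combination h1 + 3 * c * hr0
    have h3 : c * c * c - c = 3 * X := by linarith
    rw [axisSum, PySem.Int.floordiv_eq_ediv_of_pos (by norm_num : (0:Int) < 3), h3,
      Int.mul_ediv_cancel_left _ (by norm_num)]
  · have hc0 : c = 0 := by omega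
    subst hc0
    rw [PySem.List.pyRange_one_eq_nil (by omega)]
    simp [axisSum, PySem.Int.floordiv]

theorem pv_emod_congr (a : Int) : a % pvLARGE ≡ a [ZMOD pvLARGE] :=
  Int.emod_emod_of_dvd a dvd_rfl

theorem range_reindex (N t : Int) :
    PySem.List.pyRange N (N - t) (-1)
      = (PySem.List.pyRange 1 (t + 1) 1).map (fun j => N - j + 1) := by
  rw [PySem.List.pyRange_neg_one, PySem.List.pyRange_one, List.map_map]
  have h1 : (N - (N - t)).toNat = (t + 1 - 1).toNat := by omega
  rw [h1]
  exact List.map_congr_left fun x _ => by simp [Function.comp]; ring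

theorem fold_mul_emod (l : List Int) : ∀ r : Int,
    l.foldl (fun res i => (res * i) % pvLARGE) r ≡ r * l.prod [ZMOD pvLARGE] := by
  induction l with
  | nil => intro r; simp [Int.ModEq.refl]
  | cons i t ih =>
      intro r
      simp only [List.foldl_cons, List.prod_cons]
      calc t.foldl (fun res i => (res * i) % pvLARGE) ((r * i) % pvLARGE)
          ≡ (r * i) % pvLARGE * t.prod [ZMOD pvLARGE] := ih _
        _ ≡ r * i * t.prod [ZMOD pvLARGE] := (pv_emod_congr (r * i)).mul_right _
        _ = r * (i * t.prod) := by ring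

theorem fold_pinv_emod (l : List Int) : ∀ r : Int,
    l.foldl (fun res i => (res * p_inv i pvLARGE) % pvLARGE) r
      ≡ r * l.prod ^ (pvLARGE - 2).toNat [ZMOD pvLARGE] := by
  induction l with
  | nil => intro r; simp [Int.ModEq.refl]
  | cons i t ih =>
      intro r
      simp only [List.foldl_cons, List.prod_cons]
      have hp : p_inv i pvLARGE = i ^ (pvLARGE - 2).toNat % pvLARGE :=
        pypow_eq_emod i _ pvLARGE
      calc t.foldl (fun res i => (res * p_inv i pvLARGE) % pvLARGE) ((r * p_inv i pvLARGE) % pvLARGE)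
          ≡ (r * p_inv i pvLARGE) % pvLARGE * t.prod ^ (pvLARGE - 2).toNat [ZMOD pvLARGE] := ih _
        _ ≡ r * p_inv i pvLARGE * t.prod ^ (pvLARGE - 2).toNat [ZMOD pvLARGE] :=
            (pv_emod_congr _).mul_right _
        _ = r * (i ^ (pvLARGE - 2).toNat % pvLARGE) * t.prod ^ (pvLARGE - 2).toNat := by rw [hp]
        _ ≡ r * i ^ (pvLARGE - 2).toNat * t.prod ^ (pvLARGE - 2).toNat [ZMOD pvLARGE] :=
            (((pv_emod_congr _).mul_left r).mul_right _)
        _ = r * (i * t.prod) ^ (pvLARGE - 2).toNat := by rw [mul_pow]; ring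

theorem fold_pair_emod (N : Int) (l : List Int) : ∀ a b : Int,
    (l.foldl (fun (st : Int × Int) j =>
        ((st.1 * (N - j + 1)) % pvLARGE, (st.2 * j) % pvLARGE)) (a, b)).1
      ≡ a * (l.map (fun j => N - j + 1)).prod [ZMOD pvLARGE] ∧
    (l.foldl (fun (st : Int × Int) j =>
        ((st.1 * (N - j + 1)) % pvLARGE, (st.2 * j) % pvLARGE)) (a, b)).2
      ≡ b * l.prod [ZMOD pvLARGE] := by
  induction l with
  | nil => intro a b; simp [Int.ModEq.refl]
  | cons i t ih =>
      intro a b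
      simp only [List.foldl_cons, List.map_cons, List.prod_cons]
      obtain ⟨h1, h2⟩ := ih ((a * (N - i + 1)) % pvLARGE) ((b * i) % pvLARGE)
      constructor
      · calc _ ≡ (a * (N - i + 1)) % pvLARGE * (t.map (fun j => N - j + 1)).prod [ZMOD pvLARGE] := h1
          _ ≡ a * (N - i + 1) * (t.map (fun j => N - j + 1)).prod [ZMOD pvLARGE] :=
              (pv_emod_congr _).mul_right _
          _ = a * ((N - i + 1) * (t.map (fun j => N - j + 1)).prod) := by ring
      · calc _ ≡ (b * i) % pvLARGE * t.prod [ZMOD pvLARGE] := h2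
          _ ≡ b * i * t.prod [ZMOD pvLARGE] := (pv_emod_congr _).mul_right _
          _ = b * (i * t.prod) := by ring

-- ===== VERDICT (by name: the statement is the Claim_ definition above) =====
theorem solve_spec : Claim_equal_solve := by
  intro n m k _ hpre
  obtain ⟨hn, hm⟩ := hpre
  show solve n m k = solve_alt n m k
  simp only [solve, solve_alt, nck_mod, PySem.Int.mod_eq_emod_of_pos pv_hP]
  rw [axis_fold n hn, axis_fold m hm]
  rw [show k - 1 + 1 = k from by ring]
  set N := n * m - 1 with hN
  set f1 := (PySem.List.pyRange N (N - (k - 1)) (-1)).foldl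
      (fun res i => res * i % pvLARGE) 1 with hf1
  set G := (PySem.List.pyRange 1 k 1).foldl
      (fun (st : Int × Int) j => (st.1 * (N - j + 1) % pvLARGE, st.2 * j % pvLARGE)) (1, 1) with hG
  congr 1
  congr 1
  have hM : f1 ≡ 1 * ((PySem.List.pyRange 1 k 1).map (fun j => N - j + 1)).prod [ZMOD pvLARGE] := by
    rw [hf1, range_reindex N (k - 1), show k - 1 + 1 = k from by ring]
    exact fold_mul_emod _ 1
  obtain ⟨hG1, hG2⟩ := fold_pair_emod N (PySem.List.pyRange 1 k 1) 1 1
  rw [← hG] at hG1 hG2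
  have hpN : p_inv N pvLARGE = N ^ (pvLARGE - 2).toNat % pvLARGE := by
    rw [p_inv]; exact pypow_eq_emod N _ pvLARGE
  have hp2 : p_inv 2 pvLARGE = 2 ^ (pvLARGE - 2).toNat % pvLARGE := by
    rw [p_inv]; exact pypow_eq_emod 2 _ pvLARGE
  have hbase : (G.2 * (N % pvLARGE) % pvLARGE * 2) % pvLARGE
      ≡ 1 * (PySem.List.pyRange 1 k 1).prod * N * 2 [ZMOD pvLARGE] := by
    calc (G.2 * (N % pvLARGE) % pvLARGE * 2) % pvLARGE
        ≡ G.2 * (N % pvLARGE) % pvLARGE * 2 [ZMOD pvLARGE] := pv_emod_congr _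
      _ ≡ G.2 * (N % pvLARGE) * 2 [ZMOD pvLARGE] := (pv_emod_congr _).mul_right 2
      _ ≡ G.2 * N * 2 [ZMOD pvLARGE] := ((pv_emod_congr N).mul_left G.2).mul_right 2
      _ ≡ 1 * (PySem.List.pyRange 1 k 1).prod * N * 2 [ZMOD pvLARGE] :=
          (hG2.mul_right N).mul_right 2
  have hApow : pypow (G.2 * (N % pvLARGE) % pvLARGE * 2 % pvLARGE)
      (pvLARGE - 2).toNat pvLARGE
      = (G.2 * (N % pvLARGE) % pvLARGE * 2 % pvLARGE) ^ (pvLARGE - 2).toNat % pvLARGE :=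
    pypow_eq_emod _ _ pvLARGE
  show ((PySem.List.pyRange 1 k 1).foldl (fun res i => res * p_inv i pvLARGE % pvLARGE) f1
      * p_inv N pvLARGE * (k - 1) * p_inv 2 pvLARGE) % pvLARGE
      = (G.1 * (k - 1) % pvLARGE
          * pypow (G.2 * (N % pvLARGE) % pvLARGE * 2 % pvLARGE)
              (pvLARGE - 2).toNat pvLARGE) % pvLARGE
  have hA : (PySem.List.pyRange 1 k 1).foldl (fun res i => res * p_inv i pvLARGE % pvLARGE) f1
      * p_inv N pvLARGE * (k - 1) * p_inv 2 pvLARGE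
      ≡ 1 * ((PySem.List.pyRange 1 k 1).map (fun j => N - j + 1)).prod
          * (PySem.List.pyRange 1 k 1).prod ^ (pvLARGE - 2).toNat
          * N ^ (pvLARGE - 2).toNat * (k - 1) * 2 ^ (pvLARGE - 2).toNat [ZMOD pvLARGE] := by
    rw [hpN, hp2]
    calc (PySem.List.pyRange 1 k 1).foldl (fun res i => res * p_inv i pvLARGE % pvLARGE) f1
        * (N ^ (pvLARGE - 2).toNat % pvLARGE) * (k - 1) * (2 ^ (pvLARGE - 2).toNat % pvLARGE)
        ≡ (PySem.List.pyRange 1 k 1).foldl (fun res i => res * p_inv i pvLARGE % pvLARGE) f1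
          * (N ^ (pvLARGE - 2).toNat % pvLARGE) * (k - 1) * 2 ^ (pvLARGE - 2).toNat
          [ZMOD pvLARGE] := (pv_emod_congr _).mul_left _
      _ ≡ (PySem.List.pyRange 1 k 1).foldl (fun res i => res * p_inv i pvLARGE % pvLARGE) f1
          * N ^ (pvLARGE - 2).toNat * (k - 1) * 2 ^ (pvLARGE - 2).toNat [ZMOD pvLARGE] :=
          ((((pv_emod_congr _).mul_left _).mul_right _).mul_right _)
      _ ≡ f1 * (PySem.List.pyRange 1 k 1).prod ^ (pvLARGE - 2).toNat
          * N ^ (pvLARGE - 2).toNat * (k - 1) * 2 ^ (pvLARGE - 2).toNat [ZMOD pvLARGE] :=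
          (((fold_pinv_emod _ f1).mul_right _).mul_right _).mul_right _
      _ ≡ 1 * ((PySem.List.pyRange 1 k 1).map (fun j => N - j + 1)).prod
          * (PySem.List.pyRange 1 k 1).prod ^ (pvLARGE - 2).toNat
          * N ^ (pvLARGE - 2).toNat * (k - 1) * 2 ^ (pvLARGE - 2).toNat [ZMOD pvLARGE] :=
          ((((hM.mul_right _).mul_right _).mul_right _).mul_right _)
  have hB : G.1 * (k - 1) % pvLARGE
      * pypow (G.2 * (N % pvLARGE) % pvLARGE * 2 % pvLARGE)
          (pvLARGE - 2).toNat pvLARGE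
      ≡ 1 * ((PySem.List.pyRange 1 k 1).map (fun j => N - j + 1)).prod * (k - 1)
          * (1 * (PySem.List.pyRange 1 k 1).prod * N * 2) ^ (pvLARGE - 2).toNat
          [ZMOD pvLARGE] := by
    rw [hApow]
    calc G.1 * (k - 1) % pvLARGE
        * ((G.2 * (N % pvLARGE) % pvLARGE * 2 % pvLARGE) ^ (pvLARGE - 2).toNat % pvLARGE)
        ≡ G.1 * (k - 1)
          * ((G.2 * (N % pvLARGE) % pvLARGE * 2 % pvLARGE) ^ (pvLARGE - 2).toNat % pvLARGE)
          [ZMOD pvLARGE] := (pv_emod_congr _).mul_right _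
      _ ≡ G.1 * (k - 1)
          * (G.2 * (N % pvLARGE) % pvLARGE * 2 % pvLARGE) ^ (pvLARGE - 2).toNat
          [ZMOD pvLARGE] := (pv_emod_congr _).mul_left _
      _ ≡ 1 * ((PySem.List.pyRange 1 k 1).map (fun j => N - j + 1)).prod * (k - 1)
          * (G.2 * (N % pvLARGE) % pvLARGE * 2 % pvLARGE) ^ (pvLARGE - 2).toNat
          [ZMOD pvLARGE] := (hG1.mul_right _).mul_right _
      _ ≡ 1 * ((PySem.List.pyRange 1 k 1).map (fun j => N - j + 1)).prod * (k - 1)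
          * (1 * (PySem.List.pyRange 1 k 1).prod * N * 2) ^ (pvLARGE - 2).toNat
          [ZMOD pvLARGE] := Int.ModEq.mul_left _ (hbase.pow _)
  exact hA.trans ((by rw [mul_pow, mul_pow, mul_pow, one_pow]; ring :
      (1 : Int) * ((PySem.List.pyRange 1 k 1).map (fun j => N - j + 1)).prod
        * (PySem.List.pyRange 1 k 1).prod ^ (pvLARGE - 2).toNat
        * N ^ (pvLARGE - 2).toNat * (k - 1) * 2 ^ (pvLARGE - 2).toNat
      = 1 * ((PySem.List.pyRange 1 k 1).map (fun j => N - j + 1)).prod * (k - 1)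
        * (1 * (PySem.List.pyRange 1 k 1).prod * N * 2) ^ (pvLARGE - 2).toNat) ▸ hB.symm)
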